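-- pv_equiv track=rewrite | github.com/miliar/Code_Jam_Webscraper | solutions_python/solutions_year15_round0_nr3/520.py | reduces_to_k
-- ===== SOURCE A (Python) =====
-- def multiply(char1, char2):
--     if char1 == '1':
--         return (1, char2)
--
--     if char2 == '1':
--         return (1, char1)
--
--     if char1 == char2:
--         return (-1, '1')
--
--     if char1 == 'i':
--         if char2 == 'j':
--             return (1, 'k')
--         else:
--             return (-1, 'j')
--
--     if char1 == 'j':
--         if char2 == 'i':
--             return (-1, 'k')
--         else:
--             return (1, 'i')
--
--     if char1 == 'k':
--         if char2 == 'i':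
--             return (1, 'j')
--         elif char2 == 'j':
--             return (-1, 'i')
--
-- def reduces_to_k(sign, prefix, times, st):
--     times_left = times
--     current = '1'
--     cur_sign = 1
--     cur_pref = prefix
--
--     while times_left > 0 or len(cur_pref) > 0:
--         if len(cur_pref) == 0:
--             cur_pref = st
--             times_left -= 1
--
--         n_s, current = multiply(current, cur_pref[0])
--         cur_pref = cur_pref[1:]
--         cur_sign *= n_s
--
--     return cur_sign == sign and current == 'k'
-- ===== SOURCE B (Python) =====
-- BMUL = {
--     ('1', '1'): (1, '1'), ('1', 'i'): (1, 'i'), ('1', 'j'): (1, 'j'), ('1', 'k'): (1, 'k'),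
--     ('i', '1'): (1, 'i'), ('i', 'i'): (-1, '1'), ('i', 'j'): (1, 'k'), ('i', 'k'): (-1, 'j'),
--     ('j', '1'): (1, 'j'), ('j', 'i'): (-1, 'k'), ('j', 'j'): (-1, '1'), ('j', 'k'): (1, 'i'),
--     ('k', '1'): (1, 'k'), ('k', 'i'): (1, 'j'), ('k', 'j'): (-1, 'i'), ('k', 'k'): (-1, '1'),
-- }
--
-- def qmul(q, r):
--     s, b = BMUL[(q[1], r[1])]
--     return (q[0] * r[0] * s, b)
--
-- def word(s):
--     q = (1, '1')
--     for ch in s: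
--         q = qmul(q, (1, ch))
--     return q
--
-- def reduces_to_k(sign, prefix, times, st):
--     total = word(prefix)
--     if times > 0:
--         block = word(st)
--         for _ in range(times % 4):  # every quaternion unit has order dividing 4
--             total = qmul(total, block)
--     return total == (sign, 'k')
-- ===== Notes on version B (the rewrite author's own statement) =====
-- stated objective: alternative
-- what changed: Instead of simulating the character-by-character scan of prefix plus times copies of st, B folds prefix and st each once into a quaternion unit (sign, basis) and raises the st-block to the power times mod 4 (every unit quaternion has order dividing 4); asymptotically cheaper in times, though a timing run could not verify it on its generated inputs.
-- outside the precondition, e.g. on reduces_to_k(-1, 'aa', 0, ''): A returns False, B raises KeyError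
-- crash fix: When st is empty and times > 0, A raises IndexError on cur_pref[0]; B returns the natural value (the empty block is the identity, so the answer is just the prefix product compared with (sign,'k')). — e.g. on reduces_to_k(1, "k", 1, ""): A raises IndexError, B returns true
import Mathlib
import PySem

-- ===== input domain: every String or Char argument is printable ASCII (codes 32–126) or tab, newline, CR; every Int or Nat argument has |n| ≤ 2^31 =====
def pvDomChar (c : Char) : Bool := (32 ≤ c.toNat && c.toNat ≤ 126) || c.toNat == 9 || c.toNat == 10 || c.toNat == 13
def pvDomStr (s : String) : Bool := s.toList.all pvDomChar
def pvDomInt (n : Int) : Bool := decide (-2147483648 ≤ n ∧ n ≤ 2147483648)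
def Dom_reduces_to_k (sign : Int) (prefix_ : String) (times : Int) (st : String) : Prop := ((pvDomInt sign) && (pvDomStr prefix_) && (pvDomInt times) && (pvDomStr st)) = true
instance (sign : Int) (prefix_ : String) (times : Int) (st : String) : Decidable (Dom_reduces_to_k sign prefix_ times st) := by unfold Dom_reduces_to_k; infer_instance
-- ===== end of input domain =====

-- B replaces A's simulation of prefix + times copies of st by folding prefix and st once each
-- into a quaternion unit and raising the st-block to the power (times mod 4).

-- ===== PORT A =====
def multiply (char1 char2 : Char) : Option (Int × Char) :=
  if char1 = '1' then some (1, char2)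
  else if char2 = '1' then some (1, char1)
  else if char1 = char2 then some (-1, '1')
  else if char1 = 'i' then
    (if char2 = 'j' then some (1, 'k') else some (-1, 'j'))
  else if char1 = 'j' then
    (if char2 = 'i' then some (-1, 'k') else some (1, 'i'))
  else if char1 = 'k' then
    (if char2 = 'i' then some (1, 'j')
     else if char2 = 'j' then some (-1, 'i')
     else none)  -- Python falls through and returns None
  else none      -- Python falls through and returns None

-- the while loop; `none` = the Python raises (IndexError on cur_pref[0], or unpacking None)
def loopA (timesLeft : Int) (current : Char) (curSign : Int) (curPref st : List Char) :
    Option (Int × Char) :=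
  match curPref with
  | [] =>
    if h : timesLeft > 0 then
      match st with
      | [] => none                             -- cur_pref[0] raises IndexError
      | c :: rest =>
        match multiply current c with
        | none => none                         -- unpacking None raises TypeError
        | some (ns, cur') => loopA (timesLeft - 1) cur' (curSign * ns) rest st
    else some (curSign, current)
  | c :: rest =>
    match multiply current c with
    | none => none
    | some (ns, cur') => loopA timesLeft cur' (curSign * ns) rest st
termination_by (timesLeft.toNat, curPref.length)
decreasing_by
  · exact Prod.Lex.left _ _ (by omega)
  · exact Prod.Lex.right _ (by simp only [List.length_cons]; omega)

def reduces_to_k (sign : Int) (prefix_ : String) (times : Int) (st : String) : Bool :=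
  match loopA times '1' 1 prefix_.toList st.toList with
  | none => false
  | some (curSign, current) => decide (curSign = sign) && decide (current = 'k')

-- ===== PORT B =====
-- transliteration of Source B; `none` = KeyError in the BMUL dict lookup
def bmulB (b c : Char) : Option (Int × Char) :=
  match b, c with
  | '1', '1' => some (1, '1') | '1', 'i' => some (1, 'i')
  | '1', 'j' => some (1, 'j') | '1', 'k' => some (1, 'k')
  | 'i', '1' => some (1, 'i') | 'i', 'i' => some (-1, '1')
  | 'i', 'j' => some (1, 'k') | 'i', 'k' => some (-1, 'j')
  | 'j', '1' => some (1, 'j') | 'j', 'i' => some (-1, 'k')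
  | 'j', 'j' => some (-1, '1') | 'j', 'k' => some (1, 'i')
  | 'k', '1' => some (1, 'k') | 'k', 'i' => some (1, 'j')
  | 'k', 'j' => some (-1, 'i') | 'k', 'k' => some (-1, '1')
  | _, _ => none

def qmulB (q r : Int × Char) : Option (Int × Char) :=
  match bmulB q.2 r.2 with
  | none => none
  | some (s, b) => some (q.1 * r.1 * s, b)

def wstep (acc : Option (Int × Char)) (ch : Char) : Option (Int × Char) :=
  match acc with
  | none => none
  | some q => qmulB q (1, ch)

def wordB (s : List Char) : Option (Int × Char) :=
  s.foldl wstep (some (1, '1'))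

def pstep (S : Int × Char) (acc : Option (Int × Char)) (_ : Nat) : Option (Int × Char) :=
  match acc with
  | none => none
  | some q => qmulB q S

def reduces_to_k_alt (sign : Int) (prefix_ : String) (times : Int) (st : String) : Bool :=
  match wordB prefix_.toList with
  | none => false
  | some P =>
    if times > 0 then
      match wordB st.toList with
      | none => false
      | some S =>
        match (List.range (PySem.Int.mod times 4).toNat).foldl (pstep S) (some P) with
        | none => false
        | some T => decide (T = (sign, 'k'))
    else decide (P = (sign, 'k'))

-- ===== PRECONDITION & SPEC =====
def goodChar (c : Char) : Bool := c = '1' || c = 'i' || c = 'j' || c = 'k'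

-- Pre_ admits only quaternion-unit characters (and st ≠ "" when times > 0, where A raises
-- IndexError). This is slightly narrower than where A returns: on strings with foreign
-- characters A usually raises a TypeError, but it can still return when each foreign
-- character only ever meets '1' or cancels against itself (e.g. prefix "aa"); B raises
-- KeyError there, so those accidental survivors are excluded.
def Pre_reduces_to_k (sign : Int) (prefix_ : String) (times : Int) (st : String) : Prop :=
  prefix_.toList.all goodChar = true ∧
    (times ≤ 0 ∨ (st.toList ≠ [] ∧ st.toList.all goodChar = true))

instance (sign : Int) (prefix_ : String) (times : Int) (st : String) :
    Decidable (Pre_reduces_to_k sign prefix_ times st) := by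
  unfold Pre_reduces_to_k; infer_instance

def pvWitness_reduces_to_k : Int × String × Int × String := (1, "ij", 3, "ik")

-- When st is empty and times > 0, A raises IndexError; B returns the natural value
-- (the empty block is the identity, so the answer is the prefix product compared with (sign,'k')).
def Raises_reduces_to_k (sign : Int) (prefix_ : String) (times : Int) (st : String) : Prop :=
  prefix_.toList.all goodChar = true ∧ st = "" ∧ times > 0

instance (sign : Int) (prefix_ : String) (times : Int) (st : String) :
    Decidable (Raises_reduces_to_k sign prefix_ times st) := by
  unfold Raises_reduces_to_k; infer_instance

def pvRaiseWitness_reduces_to_k : Int × String × Int × String := (1, "k", 1, "")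
def pvRaiseWitnessOut_reduces_to_k : Bool := true

def Spec_reduces_to_k (sign : Int) (prefix_ : String) (times : Int) (st : String) (out : Bool) : Prop := out = reduces_to_k_alt sign prefix_ times st
instance (sign : Int) (prefix_ : String) (times : Int) (st : String) (out : Bool) : Decidable (Spec_reduces_to_k sign prefix_ times st out) := by unfold Spec_reduces_to_k; infer_instance

-- ===== CLAIM (what is proved, stated in full; the proofs are below) =====
def Claim_equal_reduces_to_k : Prop := ∀ (sign : Int) (prefix_ : String) (times : Int) (st : String), Dom_reduces_to_k sign prefix_ times st → Pre_reduces_to_k sign prefix_ times st → Spec_reduces_to_k sign prefix_ times st (reduces_to_k sign prefix_ times st)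

def Claim_raises_reduces_to_k : Prop := (∀ (sign : Int) (prefix_ : String) (times : Int) (st : String), Dom_reduces_to_k sign prefix_ times st → Raises_reduces_to_k sign prefix_ times st → ¬ Pre_reduces_to_k sign prefix_ times st) ∧ (Dom_reduces_to_k (pvRaiseWitness_reduces_to_k.1) (pvRaiseWitness_reduces_to_k.2.1) (pvRaiseWitness_reduces_to_k.2.2.1) (pvRaiseWitness_reduces_to_k.2.2.2) ∧ Raises_reduces_to_k (pvRaiseWitness_reduces_to_k.1) (pvRaiseWitness_reduces_to_k.2.1) (pvRaiseWitness_reduces_to_k.2.2.1) (pvRaiseWitness_reduces_to_k.2.2.2) ∧ reduces_to_k_alt (pvRaiseWitness_reduces_to_k.1) (pvRaiseWitness_reduces_to_k.2.1) (pvRaiseWitness_reduces_to_k.2.2.1) (pvRaiseWitness_reduces_to_k.2.2.2) = pvRaiseWitnessOut_reduces_to_k)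

-- ===== LEMMAS AND PROOFS =====

-- total multiplication used only by the proofs
def tmul (q r : Int × Char) : Int × Char := (qmulB q r).getD (0, '?')

def Validq (q : Int × Char) : Prop := (q.1 = 1 ∨ q.1 = -1) ∧ goodChar q.2 = true

theorem valid_one : Validq (1, '1') := ⟨Or.inl rfl, by decide⟩

def tword (xs : List Char) : Int × Char := xs.foldl (fun a c => tmul a (1, c)) (1, '1')

theorem good_cases {c : Char} (h : goodChar c = true) :
    c = '1' ∨ c = 'i' ∨ c = 'j' ∨ c = 'k' := by
  simpa [goodChar, or_assoc] using h

theorem qmulB_good (q r : Int × Char) (hq : goodChar q.2 = true) (hr : goodChar r.2 = true) :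
    qmulB q r = some (tmul q r) ∧ goodChar (tmul q r).2 = true := by
  obtain ⟨s1, b1⟩ := q; obtain ⟨s2, b2⟩ := r
  rcases good_cases hq with rfl | rfl | rfl | rfl <;>
    rcases good_cases hr with rfl | rfl | rfl | rfl <;>
      simp [qmulB, tmul, bmulB, goodChar]

theorem tmul_valid (q r : Int × Char) (hq : Validq q) (hr : Validq r) : Validq (tmul q r) := by
  obtain ⟨s1, b1⟩ := q; obtain ⟨s2, b2⟩ := r
  obtain ⟨hs1, hb1⟩ := hq; obtain ⟨hs2, hb2⟩ := hr
  rcases hs1 with rfl | rfl <;> rcases hs2 with rfl | rfl <;>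
    rcases good_cases hb1 with rfl | rfl | rfl | rfl <;>
      rcases good_cases hb2 with rfl | rfl | rfl | rfl <;> exact ⟨by decide, by decide⟩

theorem tmul_assoc (q r t : Int × Char) (hq : goodChar q.2 = true)
    (hr : goodChar r.2 = true) (ht : goodChar t.2 = true) :
    tmul (tmul q r) t = tmul q (tmul r t) := by
  obtain ⟨s1, b1⟩ := q; obtain ⟨s2, b2⟩ := r; obtain ⟨s3, b3⟩ := t
  rcases good_cases hq with rfl | rfl | rfl | rfl <;>
    rcases good_cases hr with rfl | rfl | rfl | rfl <;>
      rcases good_cases ht with rfl | rfl | rfl | rfl <;>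
        simp [tmul, qmulB, bmulB] <;> ring

theorem one_tmul (q : Int × Char) (hq : goodChar q.2 = true) : tmul (1, '1') q = q := by
  obtain ⟨s, b⟩ := q
  rcases good_cases hq with rfl | rfl | rfl | rfl <;> simp [tmul, qmulB, bmulB]

theorem tmul_pow4 (q S : Int × Char) (hq : Validq q) (hS : Validq S) :
    tmul (tmul (tmul (tmul q S) S) S) S = q := by
  obtain ⟨s1, b1⟩ := q; obtain ⟨s2, b2⟩ := S
  obtain ⟨hs1, hb1⟩ := hq; obtain ⟨hs2, hb2⟩ := hS
  rcases hs1 with rfl | rfl <;> rcases hs2 with rfl | rfl <;>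
    rcases good_cases hb1 with rfl | rfl | rfl | rfl <;>
      rcases good_cases hb2 with rfl | rfl | rfl | rfl <;> decide

-- closure of the total fold
theorem foldt_valid (xs : List Char) (q : Int × Char) (hq : Validq q)
    (hxs : xs.all goodChar = true) :
    Validq (xs.foldl (fun a c => tmul a (1, c)) q) := by
  induction xs generalizing q with
  | nil => exact hq
  | cons c rest ih =>
    simp only [List.all_cons, Bool.and_eq_true] at hxs
    exact ih (tmul q (1, c)) (tmul_valid q (1, c) hq ⟨Or.inl rfl, hxs.1⟩) hxs.2

theorem tword_valid (xs : List Char) (hxs : xs.all goodChar = true) : Validq (tword xs) :=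
  foldt_valid xs (1, '1') valid_one hxs

-- B's word fold computes the total fold
theorem fold_wstep (xs : List Char) (q : Int × Char) (hq : Validq q)
    (hxs : xs.all goodChar = true) :
    xs.foldl wstep (some q) = some (xs.foldl (fun a c => tmul a (1, c)) q) := by
  induction xs generalizing q with
  | nil => rfl
  | cons c rest ih =>
    simp only [List.all_cons, Bool.and_eq_true] at hxs
    have hs := (qmulB_good q (1, c) hq.2 hxs.1).1
    simp only [List.foldl_cons, wstep, hs]
    exact ih (tmul q (1, c)) (tmul_valid q (1, c) hq ⟨Or.inl rfl, hxs.1⟩) hxs.2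

theorem tmul_one_right (q : Int × Char) (hq : goodChar q.2 = true) : tmul q (1, '1') = q := by
  obtain ⟨s, b⟩ := q
  rcases good_cases hq with rfl | rfl | rfl | rfl <;> simp [tmul, qmulB, bmulB]

-- the total fold from q is q * (fold from identity)
theorem foldt_shift (xs : List Char) (q : Int × Char) (hq : Validq q)
    (hxs : xs.all goodChar = true) :
    xs.foldl (fun a c => tmul a (1, c)) q = tmul q (tword xs) := by
  induction xs generalizing q with
  | nil =>
    simp only [List.foldl_nil, tword]
    exact (tmul_one_right q hq.2).symm
  | cons c rest ih =>
    simp only [List.all_cons, Bool.and_eq_true] at hxs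
    have hc : Validq ((1 : Int), c) := ⟨Or.inl rfl, hxs.1⟩
    have hqc : Validq (tmul q (1, c)) := tmul_valid q (1, c) hq hc
    have hw : Validq (tword rest) := tword_valid rest hxs.2
    have h1 : rest.foldl (fun a c => tmul a (1, c)) (tmul q (1, c)) =
        tmul (tmul q (1, c)) (tword rest) := ih (tmul q (1, c)) hqc hxs.2
    have h2 : tword (c :: rest) = tmul (1, c) (tword rest) := by
      have h3 := ih ((1 : Int), c) hc hxs.2
      have h4 : tmul (1, '1') ((1 : Int), c) = ((1 : Int), c) := one_tmul _ hxs.1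
      simpa [tword, List.foldl_cons, h4] using h3
    simp only [List.foldl_cons, h1, h2]
    exact tmul_assoc q (1, c) (tword rest) hq.2 hxs.1 hw.2

-- A's step agrees with tmul
theorem stepA_eq (s : Int) (b c : Char) (hb : goodChar b = true) (hc : goodChar c = true) :
    ∃ p : Int × Char, multiply b c = some p ∧ ((s * p.1, p.2) : Int × Char) = tmul (s, b) (1, c) := by
  rcases good_cases hb with rfl | rfl | rfl | rfl <;>
    rcases good_cases hc with rfl | rfl | rfl | rfl <;>
      refine ⟨_, rfl, ?_⟩ <;> simp [tmul, qmulB, bmulB] <;> ring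

-- consuming the current pref is just folding it into the state
theorem loopA_pref (pref : List Char) (q : Int × Char) (t : Int) (st : List Char)
    (hq : Validq q) (hp : pref.all goodChar = true) :
    loopA t q.2 q.1 pref st =
      loopA t (pref.foldl (fun a c => tmul a (1, c)) q).2
        (pref.foldl (fun a c => tmul a (1, c)) q).1 [] st := by
  induction pref generalizing q with
  | nil => rfl
  | cons c rest ih =>
    simp only [List.all_cons, Bool.and_eq_true] at hp
    obtain ⟨p, hmul, hpair⟩ := stepA_eq q.1 q.2 c hq.2 hp.1
    have hv : Validq (tmul q (1, c)) := tmul_valid _ _ hq ⟨Or.inl rfl, hp.1⟩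
    have step : loopA t q.2 q.1 (c :: rest) st =
        loopA t (tmul q (1, c)).2 (tmul q (1, c)).1 rest st := by
      rw [loopA]
      simp only [hmul, ← hpair]
    rw [step, ih (tmul q (1, c)) hv hp.2]
    simp

-- the refill loop is iterated multiplication by the st-block
theorem loopA_iter (n : Nat) : ∀ (t : Int) (q : Int × Char) (st : List Char),
    Validq q → st.all goodChar = true → st ≠ [] → t.toNat = n →
    loopA t q.2 q.1 [] st = some ((fun x => tmul x (tword st))^[n] q) := by
  induction n with
  | zero =>
    intro t q st hq hst hne hn
    have ht : ¬ t > 0 := by omega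
    rw [loopA.eq_def]
    simp [ht]
  | succ n ih =>
    intro t q st hq hst hne hn
    have ht : t > 0 := by omega
    obtain ⟨c, rest, rfl⟩ : ∃ c rest, st = c :: rest := by
      cases st with
      | nil => exact absurd rfl hne
      | cons c rest => exact ⟨c, rest, rfl⟩
    simp only [List.all_cons, Bool.and_eq_true] at hst
    obtain ⟨p, hmul, hpair⟩ := stepA_eq q.1 q.2 c hq.2 hst.1
    have hv : Validq (tmul q (1, c)) := tmul_valid _ _ hq ⟨Or.inl rfl, hst.1⟩
    have step : loopA t q.2 q.1 [] (c :: rest) =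
        loopA (t - 1) (tmul q (1, c)).2 (tmul q (1, c)).1 rest (c :: rest) := by
      rw [loopA.eq_def]
      simp only [ht, dite_true, hmul, ← hpair]
    rw [step, loopA_pref rest (tmul q (1, c)) (t - 1) (c :: rest) hv hst.2]
    have hfold : rest.foldl (fun a c => tmul a (1, c)) (tmul q (1, c)) =
        tmul q (tword (c :: rest)) := by
      rw [foldt_shift rest (tmul q (1, c)) hv hst.2]
      have hw : Validq (tword rest) := tword_valid rest hst.2
      have h2 : tword (c :: rest) = tmul (1, c) (tword rest) := by
        have := foldt_shift rest ((1 : Int), c) ⟨Or.inl rfl, hst.1⟩ hst.2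
        simpa [tword, one_tmul ((1 : Int), c) hst.1] using this
      rw [h2, tmul_assoc q (1, c) (tword rest) hq.2 hst.1 hw.2]
    have hvv : Validq (tmul q (tword (c :: rest))) :=
      tmul_valid _ _ hq (tword_valid (c :: rest) (by simp [List.all_cons, hst.1, hst.2]))
    rw [hfold, ih (t - 1) (tmul q (tword (c :: rest))) (c :: rest) hvv
      (by simp [List.all_cons, hst.1, hst.2]) hne (by omega)]
    rw [← Function.iterate_succ_apply]

theorem iter_valid (f4 : Int × Char) (hS : Validq f4) :
    ∀ (n : Nat) (q : Int × Char), Validq q → Validq ((fun x => tmul x f4)^[n] q) := by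
  intro n
  induction n with
  | zero => intro q hq; simpa using hq
  | succ n ih =>
    intro q hq
    rw [Function.iterate_succ_apply]
    exact ih _ (tmul_valid _ _ hq hS)

theorem iter4_id (q S : Int × Char) (hq : Validq q) (hS : Validq S) :
    (fun x => tmul x S)^[4] q = q := by
  have h : (fun x => tmul x S)^[4] q = tmul (tmul (tmul (tmul q S) S) S) S := by
    simp [Function.iterate_succ_apply']
  rw [h, tmul_pow4 q S hq hS]

theorem iter_mod4 (n : Nat) (q S : Int × Char) (hq : Validq q) (hS : Validq S) :
    (fun x => tmul x S)^[n] q = (fun x => tmul x S)^[n % 4] q := by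
  induction n using Nat.strong_induction_on with
  | _ n ih =>
    by_cases h : n < 4
    · rw [Nat.mod_eq_of_lt h]
    · have h4 : n = (n - 4) + 4 := by omega
      rw [h4, Function.iterate_add_apply, iter4_id q S hq hS,
        ih (n - 4) (by omega)]
      congr 1
      omega

-- B's power loop is iterated multiplication
theorem fold_pstep (r : Nat) (P S : Int × Char) (hP : Validq P) (hS : Validq S) :
    (List.range r).foldl (pstep S) (some P) = some ((fun x => tmul x S)^[r] P) := by
  induction r with
  | zero => rfl
  | succ r ih =>
    rw [List.range_succ, List.foldl_append, ih]
    have hv := iter_valid S hS r P hP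
    have := (qmulB_good _ S hv.2 hS.2).1
    simp [pstep, this, Function.iterate_succ_apply']

theorem decide_pair (X : Int × Char) (sign : Int) :
    (decide (X.1 = sign) && decide (X.2 = 'k')) = decide (X = (sign, 'k')) := by
  obtain ⟨a, b⟩ := X
  by_cases h1 : a = sign <;> by_cases h2 : b = 'k' <;> simp [h1, h2, Prod.ext_iff]

theorem pymod_toNat (t : Int) (ht : t > 0) : (PySem.Int.mod t 4).toNat = t.toNat % 4 := by
  rw [PySem.Int.mod_eq_emod_of_pos (by omega : (0 : Int) < 4)]
  omega

-- ===== VERDICT (by name: the statement is the Claim_ definition above) =====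
theorem reduces_to_k_spec : Claim_equal_reduces_to_k := by
  intro sign prefix_ times st _ hpre
  obtain ⟨hp, hrest⟩ := hpre
  unfold Spec_reduces_to_k reduces_to_k reduces_to_k_alt
  set P := prefix_.toList.foldl (fun a c => tmul a (1, c)) ((1 : Int), '1') with hP
  have hPval : Validq P := foldt_valid _ _ valid_one hp
  have hword : wordB prefix_.toList = some P := by
    unfold wordB; exact fold_wstep _ _ valid_one hp
  have hloopA : loopA times '1' 1 prefix_.toList st.toList =
      loopA times P.2 P.1 [] st.toList :=
    loopA_pref prefix_.toList ((1 : Int), '1') times st.toList valid_one hp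
  by_cases ht : times > 0
  · -- repeated st blocks
    rcases hrest with ht' | ⟨hne, hstgood⟩
    · omega
    · have hS : wordB st.toList = some (tword st.toList) := by
        unfold wordB
        rw [fold_wstep _ _ valid_one hstgood]
        rfl
      have hSval : Validq (tword st.toList) := tword_valid _ hstgood
      have hA := loopA_iter times.toNat times P st.toList hPval hstgood hne rfl
      have hfold := fold_pstep (times.toNat % 4) P (tword st.toList) hPval hSval
      obtain ⟨a, b, hab⟩ : ∃ a b,
          (fun x => tmul x (tword st.toList))^[times.toNat] P = (a, b) := ⟨_, _, rfl⟩
      simp only [hloopA, hA, hword, hS, if_pos ht, hfold, pymod_toNat times ht,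
        ← iter_mod4 times.toNat P (tword st.toList) hPval hSval, hab]
      exact decide_pair (a, b) sign
  · -- times ≤ 0: only the prefix is processed
    have hstop : loopA times P.2 P.1 [] st.toList = some (P.1, P.2) := by
      rw [loopA.eq_def]; simp [ht]
    simp only [hloopA, hstop, hword, if_neg ht]
    exact decide_pair P sign

theorem reduces_to_k_raises : Claim_raises_reduces_to_k := by
  unfold Claim_raises_reduces_to_k
  exact ⟨by
    rintro sign prefix_ times st _ ⟨-, rfl, ht⟩ ⟨-, h⟩
    rcases h with h | ⟨hne, -⟩
    · omega
    · exact hne rfl, by decide⟩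

-- self-check: the raise-witness half of reduces_to_k_raises, re-read at the literal input
theorem reduces_to_k_raises_witness_ok : reduces_to_k_alt 1 "k" 1 "" = true := by
  have h := reduces_to_k_raises
  unfold Claim_raises_reduces_to_k at h
  exact h.2.2.2
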